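-- pv_equiv track=rewrite | github.com/ddelpozosa/advent_of_code | 2024/EEC/10/day.py | getAllGrids
-- ===== SOURCE A (Python) =====
-- def getAllGrids(lines):
--
--     grids = []
--     for irow in lines[0].strip().split(" "):
--         grids += [[irow]]
--
--     for i in range(1,len(lines)):
--         if lines[i] == "\n":
--            grids += getAllGrids(lines[i+1:])
--            return grids
--         row = lines[i].strip().split(" ")
--         for irow in range(0,len(row)):
--             grids[irow] += [row[irow]]
--     return grids
-- ===== SOURCE B (Python) =====
-- def getAllGrids(lines):
--     # Phase 1: split the lines into header+rows segments. The first line of the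
--     # input (and the line right after each blank "\n" line) is a segment header.
--     segments = []
--     cur = [lines[0]]
--     expect_header = False
--     for line in lines[1:]:
--         if expect_header:
--             cur = [line]
--             expect_header = False
--         elif line == "\n":
--             segments.append(cur)
--             expect_header = True
--         else:
--             cur.append(line)
--     if not expect_header:
--         segments.append(cur)
--     # Phase 2: per segment, gather column j from the header token and the j-th
--     # token of every row that has one.
--     grids = []
--     for seg in segments:
--         header = seg[0].strip().split(" ")
--         rows = [line.strip().split(" ") for line in seg[1:]]
--         for j, tok in enumerate(header):
--             grids.append([tok] + [r[j] for r in rows if j < len(r)])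
--     return grids
-- ===== Notes on version B (the rewrite author's own statement) =====
-- stated objective: alternative
-- what changed: Replaced A's recursion-on-the-tail with early return (re-entering getAllGrids after each blank line, appending row cells to every column as rows are read) by a two-phase iteration: one pass splits the lines into header+rows segments, then each segment's column j is gathered directly as the j-th header token plus the j-th token of every row that has one.
import Mathlib
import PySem

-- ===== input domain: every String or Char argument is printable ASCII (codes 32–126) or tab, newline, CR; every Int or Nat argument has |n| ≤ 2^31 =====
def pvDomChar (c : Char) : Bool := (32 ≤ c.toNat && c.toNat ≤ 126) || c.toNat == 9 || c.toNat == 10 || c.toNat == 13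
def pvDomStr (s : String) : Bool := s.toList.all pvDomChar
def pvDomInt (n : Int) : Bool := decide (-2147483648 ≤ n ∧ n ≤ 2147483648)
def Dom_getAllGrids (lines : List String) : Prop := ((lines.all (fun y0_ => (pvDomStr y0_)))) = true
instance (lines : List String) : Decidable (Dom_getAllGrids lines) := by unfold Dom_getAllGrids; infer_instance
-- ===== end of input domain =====

-- B replaces A's tail recursion on blank-line separators (with per-row appends to
-- every column) by a two-phase iteration: split the lines into header+rows
-- segments, then gather each column directly; return values agree wherever A returns.

-- shared helper: line.strip().split(" ")  (" " ≠ "", so split? is always some)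
def pvTokens (s : String) : List String :=
  (PySem.Str.split? (PySem.Str.strip s) " ").getD []

-- ===== PORT A =====
-- grids[irow] += [row[irow]] for irow in range(len(row)); [] on the IndexError
-- case (row longer than grids), which Pre_ excludes
def pvAUpdate : List (List String) → List String → List (List String)
  | gs, [] => gs
  | [], _ :: _ => []
  | g :: gs, t :: ts => (g ++ [t]) :: pvAUpdate gs ts

mutual
-- lines[0] raises IndexError on []; Pre_ excludes it, the port returns []
def getAllGrids (lines : List String) : List (List String) :=
  match lines with
  | [] => []
  | l0 :: rest => pvARows ((pvTokens l0).map (fun t => [t])) rest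
termination_by lines.length

-- the for-loop over lines[1:], with the early return on a "\n" line
def pvARows (grids : List (List String)) (rest : List String) : List (List String) :=
  match rest with
  | [] => grids
  | l :: rest' =>
    if l = "\n" then grids ++ getAllGrids rest'
    else pvARows (pvAUpdate grids (pvTokens l)) rest'
termination_by rest.length
end

-- ===== PORT B =====
-- phase 1: split lines[1:] into segments (a "\n" ends one; the next line is
-- unconditionally the next header); a dangling expect_header drops cur
def pvBSegs (cur : List String) (rest : List String) (expectHeader : Bool) : List (List String) :=
  match rest with
  | [] => if expectHeader then [] else [cur]
  | l :: rest' =>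
    if expectHeader then pvBSegs [l] rest' false
    else if l = "\n" then cur :: pvBSegs cur rest' true
    else pvBSegs (cur ++ [l]) rest' expectHeader

-- [r[j] for r in rows if j < len(r)]
def pvBCol (rows : List (List String)) (j : Nat) : List String :=
  rows.filterMap (fun r => r[j]?)

-- phase 2 per segment: column j is the j-th header token followed by the j-th
-- token of every row that has one (enumerate(header) is zipIdx)
def pvBSeg (seg : List String) : List (List String) :=
  match seg with
  | [] => []
  | h :: rest =>
    let rows := rest.map pvTokens
    ((pvTokens h).zipIdx).map (fun p => p.1 :: pvBCol rows p.2)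

def getAllGrids_alt (lines : List String) : List (List String) :=
  match lines with
  | [] => []
  | l0 :: rest => (pvBSegs [l0] rest false).foldl (fun acc s => acc ++ pvBSeg s) []

-- ===== PRECONDITION & SPEC =====
-- well-formed block shape: nonempty input, every segment has a header, no row of
-- a segment has more tokens than its header, and no trailing "\n" separator —
-- exactly the inputs on which the Python A returns (elsewhere it raises IndexError)
def pvOk : Option Nat → List String → Bool
  | none, [] => false
  | some _, [] => true
  | none, h :: rest => pvOk (some (pvTokens h).length) rest
  | some n, l :: rest =>
    if l = "\n" then pvOk none rest
    else decide ((pvTokens l).length ≤ n) && pvOk (some n) rest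

def Pre_getAllGrids (lines : List String) : Prop := pvOk none lines = true
instance (lines : List String) : Decidable (Pre_getAllGrids lines) := by
  unfold Pre_getAllGrids; infer_instance
def pvWitness_getAllGrids : List String := ["1 2", "3 4", "\n", "a b c"]

def Spec_getAllGrids (lines : List String) (out : List (List String)) : Prop := out = getAllGrids_alt lines
instance (lines : List String) (out : List (List String)) : Decidable (Spec_getAllGrids lines out) := by unfold Spec_getAllGrids; infer_instance

-- ===== CLAIM (what is proved, stated in full; the proofs are below) =====
def Claim_equal_getAllGrids : Prop := ∀ (lines : List String), Dom_getAllGrids lines → Pre_getAllGrids lines → Spec_getAllGrids lines (getAllGrids lines)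

-- ===== LEMMAS AND PROOFS =====

-- proof-side view of B's per-segment map, with the zipIdx start exposed
def pvColsK (hdr : List String) (rows : List (List String)) (k : Nat) : List (List String) :=
  (hdr.zipIdx k).map (fun p => p.1 :: pvBCol rows p.2)

theorem pvBSeg_cons (h : String) (rest : List String) :
    pvBSeg (h :: rest) = pvColsK (pvTokens h) (rest.map pvTokens) 0 := rfl

@[simp] theorem pvBCol_succ (rows : List (List String)) (j : Nat) :
    pvBCol rows (j + 1) = pvBCol (rows.map List.tail) j := by
  simp [pvBCol, List.filterMap_map, Function.comp_def, List.getElem?_tail]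

theorem pvColsK_succ (hdr : List String) (rows : List (List String)) (k : Nat) :
    pvColsK hdr rows (k + 1) = pvColsK hdr (rows.map List.tail) k := by
  induction hdr generalizing k with
  | nil => simp [pvColsK]
  | cons t ts ih =>
    simp only [pvColsK, List.zipIdx_cons, List.map_cons] at *
    exact congrArg₂ _ (by simp) (ih (k + 1))

@[simp] theorem pvColsK_nil_rows (hdr : List String) (k : Nat) :
    pvColsK hdr [] k = hdr.map (fun t => [t]) := by
  induction hdr generalizing k with
  | nil => simp [pvColsK]
  | cons t ts ih => simp [pvColsK, List.zipIdx_cons, pvBCol, ← ih (k + 1)]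

-- A's positional per-row update is B's column gather, one row later
theorem pvG (hdr : List String) : ∀ (r : List String) (rows : List (List String)),
    r.length ≤ hdr.length →
    pvAUpdate (pvColsK hdr rows 0) r = pvColsK hdr (rows ++ [r]) 0 := by
  induction hdr with
  | nil =>
    intro r rows hle
    have hr : r = [] := List.eq_nil_of_length_eq_zero (Nat.le_zero.mp hle)
    subst hr
    simp [pvColsK, pvAUpdate]
  | cons t ts ih =>
    intro r rows hle
    cases r with
    | nil => simp [pvAUpdate, pvColsK, pvBCol, List.filterMap_append]
    | cons x xs =>
      have hle' : xs.length ≤ ts.length := by simpa using hle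
      simp only [pvColsK, List.zipIdx_cons, List.map_cons, pvAUpdate]
      congr 1
      · simp [pvBCol, List.filterMap_append]
      · calc pvAUpdate ((ts.zipIdx 1).map (fun p => p.1 :: pvBCol rows p.2)) xs
            = pvAUpdate (pvColsK ts (rows.map List.tail) 0) xs := by
              rw [← pvColsK_succ]; rfl
          _ = pvColsK ts (rows.map List.tail ++ [xs]) 0 := ih xs _ hle'
          _ = (ts.zipIdx 1).map (fun p => p.1 :: pvBCol (rows ++ [x :: xs]) p.2) := by
              rw [show rows.map List.tail ++ [xs]
                    = (rows ++ [x :: xs]).map List.tail by simp]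
              rw [← pvColsK_succ]; rfl

-- invariant of A's row loop: its grids state is B's column gather of the segment
-- read so far, and its continuation equals B's remaining segments, concatenated
theorem pvMain : ∀ (N : Nat) (rest : List String), rest.length ≤ N →
    ∀ (h : String) (rows : List String),
    pvOk (some (pvTokens h).length) rest = true →
    pvARows (pvBSeg (h :: rows)) rest = (pvBSegs (h :: rows) rest false).flatMap pvBSeg := by
  intro N
  induction N with
  | zero =>
    intro rest hle h rows _
    have : rest = [] := List.eq_nil_of_length_eq_zero (Nat.le_zero.mp hle)
    subst this
    simp [pvARows, pvBSegs]
  | succ N ih =>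
    intro rest hle h rows hok
    cases rest with
    | nil => simp [pvARows, pvBSegs]
    | cons l rest' =>
      by_cases hl : l = "\n"
      · subst hl
        have hseg : pvOk none rest' = true := by simpa [pvOk] using hok
        cases rest' with
        | nil => simp [pvOk] at hseg
        | cons h' rest'' =>
          have hok' : pvOk (some (pvTokens h').length) rest'' = true := by
            simpa [pvOk] using hseg
          have hle' : rest''.length ≤ N := by
            simp only [List.length_cons] at hle; omega
          have hrec := ih rest'' hle' h' [] hok'
          simp only [pvARows, getAllGrids, pvBSegs, if_pos rfl, if_neg, ite_true,
            List.flatMap_cons]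
          rw [show pvBSeg [h'] = (pvTokens h').map (fun t => [t]) from by
            simp [pvBSeg_cons]] at hrec
          simp [hrec]
      · have hok2 : (pvTokens l).length ≤ (pvTokens h).length ∧
            pvOk (some (pvTokens h).length) rest' = true := by
          simpa [pvOk, hl] using hok
        have hle' : rest'.length ≤ N := by
          simp only [List.length_cons] at hle; omega
        have hstep : pvAUpdate (pvBSeg (h :: rows)) (pvTokens l)
            = pvBSeg (h :: (rows ++ [l])) := by
          rw [pvBSeg_cons, pvBSeg_cons, List.map_append, List.map_singleton]
          exact pvG (pvTokens h) (pvTokens l) _ hok2.1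
        calc pvARows (pvBSeg (h :: rows)) (l :: rest')
            = pvARows (pvBSeg (h :: (rows ++ [l]))) rest' := by
              rw [pvARows]; simp [hl, hstep]
          _ = (pvBSegs (h :: (rows ++ [l])) rest' false).flatMap pvBSeg :=
              ih rest' hle' h (rows ++ [l]) hok2.2
          _ = (pvBSegs (h :: rows) (l :: rest') false).flatMap pvBSeg := by
              rw [pvBSegs]; simp [hl]

-- ===== VERDICT (by name: the statement is the Claim_ definition above) =====
theorem getAllGrids_spec : Claim_equal_getAllGrids := by
  intro lines _dom hpre
  unfold Spec_getAllGrids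
  cases lines with
  | nil => simp [Pre_getAllGrids, pvOk] at hpre
  | cons l0 rest =>
    have hok : pvOk (some (pvTokens l0).length) rest = true := by
      simpa [Pre_getAllGrids, pvOk] using hpre
    have hmain := pvMain rest.length rest le_rfl l0 [] hok
    rw [show pvBSeg [l0] = (pvTokens l0).map (fun t => [t]) from by
      simp [pvBSeg_cons]] at hmain
    simp [getAllGrids, getAllGrids_alt, hmain, List.flatMap_def]
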